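-- pv_equiv track=rewrite | github.com/anskaffelser/eforms-sdk-nor | src/scripts/sync_lovdata.py | process_hierarchically
-- ===== SOURCE A (Python) =====
-- def get_significant_depth(codes_in_division):
--     """Finner nødvendig dybde per gruppe for å unngå overmatch."""
--     if not codes_in_division: return 2
--     max_depth = 0
--     for code in codes_in_division:
--         clean = code.rstrip('0')
--         max_depth = max(max_depth, len(clean))
--     return max(2, max_depth)
--
-- def process_hierarchically(raw_set):
--     """Beregner kutt-dybde basert på naboer i divisjonen."""
--     divisions = {}
--     for code in raw_set:
--         div = code[:2]
--         if div not in divisions: divisions[div] = []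
--         divisions[div].append(code)
--     final_prefixes = set()
--     for div, codes in divisions.items():
--         depth = get_significant_depth(codes)
--         for c in codes:
--             final_prefixes.add(c[:depth])
--     return final_prefixes
-- ===== SOURCE B (Python) =====
-- def process_hierarchically(raw_set):
--     """Beregner kutt-dybde basert paa naboer i divisjonen."""
--     out = set()
--     pending = list(raw_set)
--     while pending:
--         div = pending[0][:2]
--         same = [c for c in pending if c[:2] == div]
--         pending = [c for c in pending if c[:2] != div]
--         depth = max(2, max(len(c.rstrip('0')) for c in same))
--         for c in same:
--             out.add(c[:depth])
--     return out
-- ===== Notes on version B (the rewrite author's own statement) =====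
-- stated objective: alternative
-- what changed: Replaces A's dict-of-lists grouping (build divisions dict, then iterate its items with a helper computing each group's depth) by a dict-free worklist: repeatedly partition the remaining codes on the first code's two-char division, compute that group's depth inline with max(), emit its prefixes, and recurse on the leftover list.
import Mathlib
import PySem

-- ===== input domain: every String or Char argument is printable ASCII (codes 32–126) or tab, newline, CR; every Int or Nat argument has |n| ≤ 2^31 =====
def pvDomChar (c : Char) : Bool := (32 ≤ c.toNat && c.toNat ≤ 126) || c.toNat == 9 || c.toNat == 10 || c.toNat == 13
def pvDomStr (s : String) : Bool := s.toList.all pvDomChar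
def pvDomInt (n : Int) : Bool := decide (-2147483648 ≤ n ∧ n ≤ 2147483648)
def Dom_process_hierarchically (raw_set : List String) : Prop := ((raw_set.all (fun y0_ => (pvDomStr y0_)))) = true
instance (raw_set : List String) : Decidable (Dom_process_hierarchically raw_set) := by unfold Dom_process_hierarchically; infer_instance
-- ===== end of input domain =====

-- B replaces A's dict-of-lists grouping and items loop by a dict-free worklist: repeatedly partition
-- the remaining codes on the first code's division, emit that group's prefixes, recurse on the rest
-- (objective: alternative).

-- shared faithful primitives: code[:n] and code.rstrip('0') (hand port of rstrip with a char set, exact: drops trailing '0')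
def pfxOf (s : String) (n : Int) : String := String.ofList (PySem.List.slice s.toList none (some n))
def rstrip0 (s : String) : List Char := ((s.toList.reverse).dropWhile (fun c => c == '0')).reverse

-- ===== PORT A =====
def get_significant_depth (codes_in_division : List String) : Int :=
  if codes_in_division = [] then 2
  else max 2 (codes_in_division.foldl (fun m c => max m ((rstrip0 c).length : Int)) 0)

def process_hierarchically (raw_set : List String) : List String :=
  let divisions : PySem.Dict String (List String) := raw_set.foldl (fun d code =>
      let dv := pfxOf code 2
      let d := if d.contains dv then d else d.insert dv ([] : List String)
      d.modify dv [] (fun l => l ++ [code])) PySem.Dict.empty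
  divisions.items.foldl (fun s p =>
      let depth := get_significant_depth p.2
      p.2.foldl (fun s c => PySem.Set.add s (pfxOf c depth)) s) PySem.Set.empty

-- ===== PORT B =====
-- the while loop over the shrinking worklist `pending`; 'same' always contains pending[0],
-- so Python's max(...) is defined there and the `.getD 0` default is never consulted
def process_hierarchically_alt_go (out pending : List String) : List String :=
  match pending with
  | [] => out
  | c0 :: rest0 =>
      let dv := pfxOf c0 2
      let same := (c0 :: rest0).filter (fun c => pfxOf c 2 == dv)
      let pending' := (c0 :: rest0).filter (fun c => pfxOf c 2 != dv)
      let depth : Int :=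
        max 2 ((PySem.List.max? (same.map (fun c => ((rstrip0 c).length : Int))) (fun y => y)).getD 0)
      process_hierarchically_alt_go
        (same.foldl (fun s c => PySem.Set.add s (pfxOf c depth)) out) pending'
termination_by pending.length
decreasing_by
  simp only [List.filter_cons, bne_self_eq_false, Bool.false_eq_true, if_false, List.length_cons]
  exact Nat.lt_succ_of_le (List.length_filter_le _ _)

def process_hierarchically_alt (raw_set : List String) : List String :=
  process_hierarchically_alt_go PySem.Set.empty raw_set

-- ===== PRECONDITION & SPEC =====
def Spec_process_hierarchically (raw_set : List String) (out : List String) : Prop := out = process_hierarchically_alt raw_set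
instance (raw_set : List String) (out : List String) : Decidable (Spec_process_hierarchically raw_set out) := by unfold Spec_process_hierarchically; infer_instance

-- ===== CLAIM (what is proved, stated in full; the proofs are below) =====
def Claim_equal_process_hierarchically : Prop := ∀ (raw_set : List String), Dom_process_hierarchically raw_set → Spec_process_hierarchically raw_set (process_hierarchically raw_set)

-- ===== LEMMAS AND PROOFS =====

-- division of a code, the group of a division, significant length
def dvOf (c : String) : String := pfxOf c 2
def grp (l : List String) (k : String) : List String := l.filter (fun c => dvOf c == k)
def lenr (c : String) : Int := ((rstrip0 c).length : Int)

-- the common emission step: add the prefixes of one division's group, cut at its depth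
def emitG (s codes : List String) : List String :=
  codes.foldl (fun s c => PySem.Set.add s (pfxOf c (get_significant_depth codes))) s

theorem grp_nil (k : String) : grp [] k = [] := rfl

theorem grp_cons (c : String) (l : List String) (k : String) :
    grp (c :: l) k = (if dvOf c = k then [c] else []) ++ grp l k := by
  simp [grp, List.filter_cons]
  split_ifs with h <;> simp_all

-- A's divisions-building step
def stepA (d : PySem.Dict String (List String)) (code : String) : PySem.Dict String (List String) :=
  let dv := pfxOf code 2
  let d := if d.contains dv then d else d.insert dv ([] : List String)
  d.modify dv [] (fun l => l ++ [code])

theorem keys_stepA (d : PySem.Dict String (List String)) (c : String) :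
    (stepA d c).keys = PySem.Set.add d.keys (dvOf c) := by
  unfold stepA dvOf
  dsimp only
  by_cases h : d.contains (pfxOf c 2)
  · rw [if_pos h, PySem.Dict.keys_modify, PySem.Dict.keys_insert_of_contains _ _ h,
      PySem.Set.add_of_mem ((PySem.Dict.contains_iff_mem_keys d _).mp h)]
  · rw [if_neg h, PySem.Dict.keys_modify,
      PySem.Dict.keys_insert_of_contains _ _ (PySem.Dict.contains_insert_self d _ _),
      PySem.Dict.keys_insert_of_not_contains _ _ (by simpa using h),
      PySem.Set.add_of_not_mem (fun hm => h ((PySem.Dict.contains_iff_mem_keys d _).mpr hm))]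

theorem getD_stepA (d : PySem.Dict String (List String)) (c k : String) :
    (stepA d c).getD k [] = if dvOf c = k then d.getD k [] ++ [c] else d.getD k [] := by
  unfold stepA dvOf
  dsimp only
  by_cases hk : pfxOf c 2 = k
  · subst hk
    by_cases h : d.contains (pfxOf c 2)
    · simp [h]
    · simp [h, PySem.Dict.getD_insert_self,
        PySem.Dict.getD_of_not_contains _ _ (by simpa using h)]
  · have hne : ¬ k = pfxOf c 2 := fun e => hk e.symm
    by_cases h : d.contains (pfxOf c 2) <;>
      simp [h, PySem.Dict.getD_modify, PySem.Dict.getD_insert, hk, hne]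

theorem keys_foldA (l : List String) (d : PySem.Dict String (List String)) :
    (l.foldl stepA d).keys = PySem.Set.update d.keys (l.map dvOf) := by
  induction l generalizing d with
  | nil => simp [PySem.Set.update_nil]
  | cons c l ih => simp [List.foldl_cons, ih, keys_stepA, PySem.Set.update_cons]

theorem getD_foldA (l : List String) (d : PySem.Dict String (List String)) (k : String) :
    (l.foldl stepA d).getD k [] = d.getD k [] ++ grp l k := by
  induction l generalizing d with
  | nil => simp [grp_nil]
  | cons c l ih =>
      simp only [List.foldl_cons, ih, getD_stepA, grp_cons]
      split_ifs <;> simp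

-- A's result, characterised as a fold over the distinct divisions in first-occurrence order
theorem A_char (raw_set : List String) :
    process_hierarchically raw_set
      = (PySem.Set.ofList (raw_set.map dvOf)).foldl
          (fun s k => emitG s (grp raw_set k)) PySem.Set.empty := by
  unfold process_hierarchically
  have hkeysA : (raw_set.foldl stepA PySem.Dict.empty).keys = PySem.Set.ofList (raw_set.map dvOf) := by
    rw [keys_foldA]; simp [PySem.Set.update_nil_left]
  have hndA : (raw_set.foldl stepA PySem.Dict.empty).keys.Nodup := by
    rw [hkeysA]; exact PySem.Set.nodup_ofList _
  have hitems : (raw_set.foldl stepA PySem.Dict.empty).items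
      = (PySem.Set.ofList (raw_set.map dvOf)).map (fun k => (k, grp raw_set k)) := by
    rw [PySem.Dict.items_eq_map_keys _ hndA ([] : List String), hkeysA]
    exact List.map_congr_left (fun k _ => by rw [getD_foldA]; simp)
  show (raw_set.foldl stepA PySem.Dict.empty).items.foldl _ _ = _
  rw [hitems, List.foldl_map]
  rfl

-- B's inline depth equals A's helper
theorem depthB_eq (codes : List String) :
    max 2 ((PySem.List.max? (codes.map lenr) (fun y => y)).getD 0)
      = get_significant_depth codes := by
  cases codes with
  | nil => rfl
  | cons x xs =>
      rw [List.map_cons, PySem.List.max?_id_cons, Option.getD_some, List.foldl_map]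
      unfold get_significant_depth lenr
      rw [if_neg (by simp), List.foldl_cons,
        max_eq_right (a := (0 : Int)) (b := ((rstrip0 x).length : Int)) (by positivity)]

-- keep-first dedup commutes with filtering
theorem ofList_filter (p : String → Bool) (l : List String) :
    PySem.Set.ofList (l.filter p) = (PySem.Set.ofList l).filter p := by
  induction l with
  | nil => rfl
  | cons x l ih =>
      by_cases hp : p x
      · rw [List.filter_cons_of_pos hp, PySem.Set.ofList_cons, PySem.Set.ofList_cons,
          List.filter_cons_of_pos hp]
        congr 1
        rw [show PySem.Set.discard (PySem.Set.ofList (l.filter p)) x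
              = (PySem.Set.ofList (l.filter p)).filter (fun y => y != x) from rfl,
          show PySem.Set.discard (PySem.Set.ofList l) x
              = (PySem.Set.ofList l).filter (fun y => y != x) from rfl,
          ih, List.filter_comm]
      · rw [List.filter_cons_of_neg hp, PySem.Set.ofList_cons, List.filter_cons_of_neg hp, ih,
          show PySem.Set.discard (PySem.Set.ofList l) x
              = (PySem.Set.ofList l).filter (fun y => y != x) from rfl,
          List.filter_comm]
        symm
        apply List.filter_eq_self.mpr
        intro y hy
        have hyp : p y := List.of_mem_filter hy
        have : y ≠ x := fun e => hp (e ▸ hyp)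
        simpa using this

-- the distinct divisions of the worklist split off the head's division
theorem divs_cons (c0 : String) (rest : List String) :
    PySem.Set.ofList ((c0 :: rest).map dvOf)
      = dvOf c0 ::
        PySem.Set.ofList (((c0 :: rest).filter (fun c => dvOf c != dvOf c0)).map dvOf) := by
  rw [List.map_cons, PySem.Set.ofList_cons,
    show PySem.Set.discard (PySem.Set.ofList (rest.map dvOf)) (dvOf c0)
        = (PySem.Set.ofList (rest.map dvOf)).filter (fun y => y != dvOf c0) from rfl,
    ← ofList_filter, List.filter_map, List.filter_cons_of_neg (by simp)]
  rfl

-- dropping the head's division does not change the other groups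
theorem grp_filter_ne (l : List String) (k0 k : String) (hk : k ≠ k0) :
    grp (l.filter (fun c => dvOf c != k0)) k = grp l k := by
  unfold grp
  rw [List.filter_filter]
  apply List.filter_congr
  intro c _
  by_cases h : dvOf c = k
  · simp [h, hk]
  · simp [h]

-- B's worklist loop, characterised as the same fold over distinct divisions
theorem go_char (out pending : List String) :
    process_hierarchically_alt_go out pending
      = (PySem.Set.ofList (pending.map dvOf)).foldl
          (fun s k => emitG s (grp pending k)) out := by
  induction out, pending using process_hierarchically_alt_go.induct with
  | case1 out =>
      rw [process_hierarchically_alt_go]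
      rfl
  | case2 out c0 rest0 dv same pending' depth ih =>
      rw [process_hierarchically_alt_go]
      rw [ih]
      have hsame : same = grp (c0 :: rest0) (dvOf c0) := rfl
      have hpend : pending' = (c0 :: rest0).filter (fun c => dvOf c != dvOf c0) := rfl
      have hdep : depth = get_significant_depth same := by
        rw [show depth = max 2 ((PySem.List.max? (same.map lenr) (fun y => y)).getD 0) from rfl,
          depthB_eq]
      rw [divs_cons, List.foldl_cons, ← hpend]
      have hemit : same.foldl (fun s c => PySem.Set.add s (pfxOf c depth)) out
          = emitG out (grp (c0 :: rest0) (dvOf c0)) := by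
        rw [hdep, hsame]; rfl
      rw [hemit]
      apply PySem.List.foldl_congr_mem
      intro s k hk
      have hkne : k ≠ dvOf c0 := by
        have hk' : k ∈ pending'.map dvOf := by simpa using hk
        obtain ⟨c, hc, hck⟩ := List.mem_map.mp hk'
        have := List.of_mem_filter (p := fun c => dvOf c != dvOf c0) (by rw [hpend] at hc; exact hc)
        rw [← hck]
        simpa using this
      rw [hpend, grp_filter_ne _ _ _ hkne]

-- ===== VERDICT (by name: the statement is the Claim_ definition above) =====
theorem process_hierarchically_spec : Claim_equal_process_hierarchically := by
  intro raw_set _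
  unfold Spec_process_hierarchically process_hierarchically_alt
  rw [A_char, go_char]
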